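-- pv_equiv track=rewrite | github.com/prdx33/dotfiles | .config/sketchybar/icons/generate_icons.py | hexagon
-- ===== SOURCE A (Python) =====
-- def hexagon(color):
--     """Hexagon shape"""
--     pixels = {}
--     pattern = [
--         "   ####   ",
--         "  ######  ",
--         " ######## ",
--         "##########",
--         "##########",
--         "##########",
--         "##########",
--         " ######## ",
--         "  ######  ",
--         "   ####   ",
--     ]
--     for y, row in enumerate(pattern):
--         for x, char in enumerate(row):
--             if char == '#':
--                 pixels[(x, y)] = color
--     return pixels
-- ===== SOURCE B (Python) =====
-- def hexagon(color):
--     """Hexagon shape, derived geometrically instead of from a bitmap."""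
--     pixels = {}
--     for y in range(10):
--         margin = max(0, 3 - min(y, 9 - y))
--         for x in range(margin, 10 - margin):
--             pixels[(x, y)] = color
--     return pixels
-- ===== Notes on version B (the rewrite author's own statement) =====
-- stated objective: alternative
-- what changed: B computes the hexagon geometrically (per-row margin formula max(0, 3 - min(y, 9-y)) and an x-range) instead of scanning a hardcoded 10x10 ASCII bitmap character by character.
import Mathlib
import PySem

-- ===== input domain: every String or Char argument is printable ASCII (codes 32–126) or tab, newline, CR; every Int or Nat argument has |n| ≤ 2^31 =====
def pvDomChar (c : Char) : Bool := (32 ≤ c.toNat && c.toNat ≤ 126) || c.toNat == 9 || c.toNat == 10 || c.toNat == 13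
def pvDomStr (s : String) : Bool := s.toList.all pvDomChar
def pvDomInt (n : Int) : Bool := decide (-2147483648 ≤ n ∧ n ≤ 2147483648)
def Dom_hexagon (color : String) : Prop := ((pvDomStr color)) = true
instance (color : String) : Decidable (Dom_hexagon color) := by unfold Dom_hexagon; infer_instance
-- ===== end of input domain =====

-- B derives the hexagon from a per-row margin formula instead of scanning A's hardcoded bitmap; objective: alternative decomposition, same result.

-- ===== PORT A =====
-- A scans a fixed list of 10 pattern strings, inserting (x, y) ↦ color into a dict for each '#';
-- the dict is returned as its items, flattened to (x, y, color) per the type convention.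
def hexagon (color : String) : List (Int × Int × String) :=
  let pattern : List String := [
    "   ####   ",
    "  ######  ",
    " ######## ",
    "##########",
    "##########",
    "##########",
    "##########",
    " ######## ",
    "  ######  ",
    "   ####   "]
  let d : PySem.Dict (Int × Int) String :=
    (PySem.List.enumerate pattern).foldl (fun d (p : Int × String) =>
      (PySem.List.enumerate p.2.toList).foldl (fun d (q : Int × Char) =>
        if q.2 = '#' then d.insert (q.1, p.1) color else d) d) PySem.Dict.empty
  d.items.map (fun p => (p.1.1, p.1.2, color))

-- ===== PORT B =====
-- B: for y in range(10), margin = max(0, 3 - min(y, 9-y)); pixels for x in range(margin, 10-margin).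
def hexagon_alt (color : String) : List (Int × Int × String) :=
  (PySem.List.pyRange 0 10 1).foldl (fun acc y =>
    let margin := max 0 (3 - min y (9 - y))
    acc ++ (PySem.List.pyRange margin (10 - margin) 1).map (fun x => (x, y, color))) []

-- ===== PRECONDITION & SPEC =====
def Spec_hexagon (color : String) (out : List (Int × Int × String)) : Prop := out = hexagon_alt color
instance (color : String) (out : List (Int × Int × String)) : Decidable (Spec_hexagon color out) := by unfold Spec_hexagon; infer_instance

-- ===== CLAIM (what is proved, stated in full; the proofs are below) =====
def Claim_equal_hexagon : Prop := ∀ (color : String), Dom_hexagon color → Spec_hexagon color (hexagon color)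

-- ===== LEMMAS AND PROOFS =====

-- A's bitmap, and the closed pixel-key lists each port produces (values aside).
def hexPattern : List String := [
    "   ####   ",
    "  ######  ",
    " ######## ",
    "##########",
    "##########",
    "##########",
    "##########",
    " ######## ",
    "  ######  ",
    "   ####   "]

def hexKeysA : List (Int × Int) :=
  (PySem.List.enumerate hexPattern).flatMap (fun p =>
    ((PySem.List.enumerate p.2.toList).filter (fun q => decide (q.2 = '#'))).map
      (fun q => ((q.1, p.1) : Int × Int)))

def hexKeysB : List (Int × Int) :=
  (PySem.List.pyRange 0 10 1).flatMap (fun y =>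
    (PySem.List.pyRange (max 0 (3 - min y (9 - y))) (10 - max 0 (3 - min y (9 - y))) 1).map
      (fun x => ((x, y) : Int × Int)))

lemma hexA_eq (c : String) :
    hexagon c = hexKeysA.map (fun k => (k.1, k.2, c)) := by
  unfold hexagon
  have h1 : ∀ (p : Int × String) (d : PySem.Dict (Int × Int) String),
      (PySem.List.enumerate p.2.toList).foldl (fun d (q : Int × Char) =>
        if q.2 = '#' then d.insert (q.1, p.1) c else d) d
      = (((PySem.List.enumerate p.2.toList).filter (fun q => decide (q.2 = '#'))).map
          (fun q => ((q.1, p.1) : Int × Int))).foldl (fun d k => d.insert k c) d := by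
    intro p d
    rw [PySem.List.foldl_ite_eq_foldl_filter, List.foldl_map]
  simp only [h1]
  rw [← List.foldl_flatMap]
  have hfresh : (hexKeysA.foldl (fun d k => d.insert k c) PySem.Dict.empty).items
      = PySem.Dict.empty.items ++ hexKeysA.map (fun k => (k, c)) := by
    exact PySem.Dict.items_foldl_insert_fresh hexKeysA (k := id) (v := fun _ => c)
      PySem.Dict.empty (by intro a _; exact PySem.Dict.contains_empty a) (by decide)
  simp only [hexKeysA, hexPattern] at hfresh
  rw [hfresh]
  simp only [PySem.Dict.empty, List.nil_append, List.map_map]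
  rfl

lemma hexB_eq (c : String) :
    hexagon_alt c = hexKeysB.map (fun k => (k.1, k.2, c)) := by
  unfold hexagon_alt
  simp only [PySem.List.foldl_append_eq_flatMap, List.nil_append]
  rw [hexKeysB, List.map_flatMap]
  congr 1
  funext y
  rw [List.map_map]
  rfl

lemma hexKeys_eq : hexKeysA = hexKeysB := by decide

-- ===== VERDICT (by name: the statement is the Claim_ definition above) =====
theorem hexagon_spec : Claim_equal_hexagon := by
  intro color _
  unfold Spec_hexagon
  rw [hexA_eq, hexB_eq, hexKeys_eq]
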